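-- pv_equiv track=rewrite | github.com/xcombelle/sgftool | goban_to_text.py | goban_to_string
-- ===== SOURCE A (Python) =====
-- def goban_to_string(goban, size):
--     result=[]
--     for x in range(-1,size+1):
--         for y in range(-1, size+1):
--             if  -1==x or x==size or y==-1 or y==size:
--                 result.append('Z')
--             else:
--                 result.append(goban[x][y])
--     return "".join(result)
-- ===== SOURCE B (Python) =====
-- def goban_to_string(goban, size):
--     border = 'Z' * (size + 2)
--     rows = [border]
--     for row in goban[:size]:
--         rows.append('Z' + ''.join(row[:size]) + 'Z')
--     rows.append(border)
--     return ''.join(rows)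
-- ===== Notes on version B (the rewrite author's own statement) =====
-- stated objective: simpler
-- what changed: B builds the board row-by-row (two full border rows by string repetition, each interior row as 'Z' + joined row slice + 'Z') instead of A's cell-by-cell double loop with a per-cell border test.
-- intended difference: On negative sizes whose slice goban[:size] still holds rows (size = -1, or size <= -2 with more than |size| rows) A returns a bare fragment of border from its range arithmetic ('Z' for size = -1, '' otherwise) while B returns the bordered serialization of those sliced rows; a board size is never negative, so the corner is unspecified and B's row-built value is as valid as A's accidental fragment. — e.g. on goban_to_string([], -1): A returns "Z", B returns "ZZ"
import Mathlib
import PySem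

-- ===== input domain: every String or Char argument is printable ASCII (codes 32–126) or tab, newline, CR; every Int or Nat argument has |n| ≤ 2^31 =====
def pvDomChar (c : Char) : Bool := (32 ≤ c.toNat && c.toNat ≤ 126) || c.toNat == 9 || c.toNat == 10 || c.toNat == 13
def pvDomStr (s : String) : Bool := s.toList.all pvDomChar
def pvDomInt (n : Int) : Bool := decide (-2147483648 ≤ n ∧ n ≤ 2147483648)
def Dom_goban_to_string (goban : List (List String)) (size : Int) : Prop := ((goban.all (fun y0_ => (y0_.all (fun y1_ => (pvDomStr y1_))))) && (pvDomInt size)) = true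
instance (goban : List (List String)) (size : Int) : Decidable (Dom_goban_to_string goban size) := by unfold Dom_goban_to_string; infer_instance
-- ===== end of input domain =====

-- B builds the serialized board row-by-row (border rows by string repetition, interior rows as 'Z' + joined slice + 'Z') instead of A's cell-by-cell double loop; objective: simpler.

-- B builds the board row-by-row (border rows by repetition, interior rows as 'Z' + joined slice + 'Z') instead of A's cell-by-cell double loop with a per-cell border test; objective: simpler.

-- ===== PORT A =====
def goban_to_string (goban : List (List String)) (size : Int) : String :=
  let result := (PySem.List.pyRange (-1) (size + 1)).foldl (fun acc x =>
    (PySem.List.pyRange (-1) (size + 1)).foldl (fun acc y =>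
      if x = -1 ∨ x = size ∨ y = -1 ∨ y = size then acc ++ ["Z"]
      else acc ++ [PySem.List.pyGetD (PySem.List.pyGetD goban x []) y ""]) acc) []
  PySem.Str.join "" result

-- ===== PORT B =====
-- 'Z' * (size + 2) is ported as a replicate of (size+2).toNat chars, exact for Python string repetition
-- (a non-positive count gives the empty string).
def goban_to_string_alt (goban : List (List String)) (size : Int) : String :=
  let border := String.ofList (List.replicate (size + 2).toNat 'Z')
  let rows := (PySem.List.slice goban none (some size)).foldl
    (fun acc row => acc ++ ["Z" ++ PySem.Str.join "" (PySem.List.slice row none (some size)) ++ "Z"]) [border]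
  PySem.Str.join "" (rows ++ [border])

-- ===== PRECONDITION & SPEC =====
-- Pre_ excludes exactly the inputs on which A raises IndexError: a nonnegative size with a goban whose
-- first `size` rows do not cover the size x size board.
def Pre_goban_to_string (goban : List (List String)) (size : Int) : Prop :=
  size < 0 ∨ (0 ≤ size ∧ size.toNat ≤ goban.length ∧ ∀ row ∈ goban.take size.toNat, size.toNat ≤ row.length)
instance (goban : List (List String)) (size : Int) : Decidable (Pre_goban_to_string goban size) := by unfold Pre_goban_to_string; infer_instance
def pvWitness_goban_to_string : List (List String) × Int := ([["a", "b"], [".", "x"]], 2)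

-- On negative sizes whose Python slice goban[:size] still holds rows (size = -1, or size <= -2 with more
-- than |size| rows) A returns a bare fragment of border produced by its range arithmetic ('Z' for size = -1,
-- '' otherwise) while B returns the bordered serialization of those sliced rows; a board size is never
-- negative, so this corner is unspecified and B's row-built value is as valid as A's accidental fragment.
def D_goban_to_string (goban : List (List String)) (size : Int) : Prop :=
  size = -1 ∨ (size ≤ -2 ∧ (-size).toNat < goban.length)
instance (goban : List (List String)) (size : Int) : Decidable (D_goban_to_string goban size) := by unfold D_goban_to_string; infer_instance

def Spec_goban_to_string (goban : List (List String)) (size : Int) (out : String) : Prop := ¬ D_goban_to_string goban size → out = goban_to_string_alt goban size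
instance (goban : List (List String)) (size : Int) (out : String) : Decidable (Spec_goban_to_string goban size out) := by unfold Spec_goban_to_string; infer_instance

def pvDiffWitness_goban_to_string : List (List String) × Int := ([], -1)
def pvDiffWitnessOut_goban_to_string : String × String := ("Z", "ZZ")

-- ===== CLAIM (what is proved, stated in full; the proofs are below) =====
def Claim_unchanged_goban_to_string : Prop := ∀ (goban : List (List String)) (size : Int), Dom_goban_to_string goban size → Pre_goban_to_string goban size → Spec_goban_to_string goban size (goban_to_string goban size)
def Claim_changed_goban_to_string : Prop := Dom_goban_to_string (pvDiffWitness_goban_to_string.1) (pvDiffWitness_goban_to_string.2) ∧ Pre_goban_to_string (pvDiffWitness_goban_to_string.1) (pvDiffWitness_goban_to_string.2) ∧ D_goban_to_string (pvDiffWitness_goban_to_string.1) (pvDiffWitness_goban_to_string.2) ∧ goban_to_string (pvDiffWitness_goban_to_string.1) (pvDiffWitness_goban_to_string.2) = pvDiffWitnessOut_goban_to_string.1 ∧ goban_to_string_alt (pvDiffWitness_goban_to_string.1) (pvDiffWitness_goban_to_string.2) = pvDiffWitnessOut_goban_to_string.2 ∧ pvDiffWitnessOut_goban_to_string.1 ≠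 pvDiffWitnessOut_goban_to_string.2
def Claim_exact_goban_to_string : Prop := ∀ (goban : List (List String)) (size : Int), Dom_goban_to_string goban size → Pre_goban_to_string goban size → D_goban_to_string goban size → goban_to_string goban size ≠ goban_to_string_alt goban size

-- ===== LEMMAS AND PROOFS =====
theorem intercalate_nil_eq_flatten (L : List (List Char)) : List.intercalate [] L = L.flatten := by
  induction L with
  | nil => rfl
  | cons a t ih => cases t <;> simp_all [List.intercalate]

theorem map_range_getD {α : Type} (xs : List α) (d : α) (n : Nat) (h : n ≤ xs.length) :
    (List.range n).map (fun j => xs.getD j d) = xs.take n := by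
  apply List.ext_getElem
  · simp [Nat.min_eq_left h]
  · intro i hi _; simp [List.getElem?_eq_getElem (by simp at hi; omega : i < xs.length)]

theorem flatten_map_flatMap {α : Type} (g : α → List String) (L : List α) :
    (List.map String.toList (L.flatMap g)).flatten
      = (L.map (fun x => (List.map String.toList (g x)).flatten)).flatten := by
  induction L with
  | nil => rfl
  | cons a t ih => simp_all

theorem goban_key (goban : List (List String)) (n : Nat)
    (h1 : n ≤ goban.length)
    (h2 : ∀ row ∈ goban.take n, n ≤ row.length) :
    goban_to_string goban (n : Int) = goban_to_string_alt goban (n : Int) := by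
  unfold goban_to_string goban_to_string_alt
  have hbody : (fun (acc : List String) (x : Int) =>
      (PySem.List.pyRange (-1) ((n:Int) + 1)).foldl (fun acc y =>
        if x = -1 ∨ x = (n:Int) ∨ y = -1 ∨ y = (n:Int) then acc ++ ["Z"]
        else acc ++ [PySem.List.pyGetD (PySem.List.pyGetD goban x []) y ""]) acc)
      = fun acc x => acc ++ (PySem.List.pyRange (-1) ((n:Int) + 1)).map (fun y =>
        if x = -1 ∨ x = (n:Int) ∨ y = -1 ∨ y = (n:Int) then "Z"
        else PySem.List.pyGetD (PySem.List.pyGetD goban x []) y "") := by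
    funext acc x
    rw [← PySem.List.foldl_append_singleton_eq_map]
    congr 1; funext a y; split <;> rfl
  rw [hbody, PySem.List.foldl_append_eq_flatMap]
  have hR : PySem.List.pyRange (-1) ((n:Int) + 1)
      = -1 :: ((List.range n).map (fun k => (Nat.cast k : Int)) ++ [(n : Int)]) := by
    rw [PySem.List.pyRange_one_cons (by omega)]
    have e0 : (-1 : Int) + 1 = 0 := by omega
    have e1 : ((n:Int) + 1) = ((n+1 : Nat) : Int) := by push_cast; ring
    rw [e0, e1, PySem.List.pyRange_zero_natCast, List.range_succ, List.map_append]
    simp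
  have hsl : PySem.List.slice goban none (some ((n:Int))) = goban.take n := by
    simp [PySem.List.slice_to_natCast]
  have hslr : ∀ row : List String, PySem.List.slice row none (some ((n:Int))) = row.take n := by
    intro row; simp [PySem.List.slice_to_natCast]
  simp only [hsl, hslr]
  rw [PySem.List.foldl_append_singleton_eq_map]
  have hnn : ((n:Int) + 2).toNat = n + 2 := by omega
  rw [hnn]
  simp only [PySem.Str.join, PySem.Chars.join]
  have hemp : "".toList = ([] : List Char) := rfl
  rw [hemp]
  congr 1
  rw [intercalate_nil_eq_flatten, intercalate_nil_eq_flatten, List.nil_append]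
  rw [flatten_map_flatMap]
  -- interior rows
  have hinter : ∀ k : Nat, k < n →
      (List.map String.toList ((PySem.List.pyRange (-1) ((n:Int) + 1)).map (fun y =>
        if (k:Int) = -1 ∨ (k:Int) = (n:Int) ∨ y = -1 ∨ y = (n:Int) then "Z"
        else PySem.List.pyGetD (PySem.List.pyGetD goban (k:Int) []) y ""))).flatten
        = 'Z' :: ((List.map String.toList ((goban.getD k []).take n)).flatten ++ ['Z']) := by
    intro k hk
    rw [hR]
    simp only [List.map_cons, List.map_append, List.map_map, List.flatten_cons, List.flatten_append]
    have hcmid : ∀ j ∈ List.range n,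
        (String.toList ∘ (fun y =>
          if (k:Int) = -1 ∨ (k:Int) = (n:Int) ∨ y = -1 ∨ y = (n:Int) then "Z"
          else PySem.List.pyGetD (PySem.List.pyGetD goban (k:Int) []) y "") ∘ (fun j : Nat => (Nat.cast j : Int))) j
          = (fun j : Nat => ((goban.getD k []).getD j "").toList) j := by
      intro j hj
      have hjn : j < n := List.mem_range.mp hj
      simp only [Function.comp]
      rw [if_neg (show ¬((k:Int) = -1 ∨ (k:Int) = (n:Int) ∨ (Nat.cast j : Int) = -1 ∨ (Nat.cast j : Int) = (n:Int)) by
        push_cast; rintro (h|h|h|h) <;> omega)]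
      simp [PySem.List.pyGetD_natCast]
    rw [List.map_congr_left hcmid]
    have hcomp : (fun j : Nat => ((goban.getD k []).getD j "").toList)
        = String.toList ∘ (fun j : Nat => (goban.getD k []).getD j "") := rfl
    rw [hcomp, ← List.map_map, map_range_getD _ _ _ (h2 _ ?_)]
    · have hz : "Z".toList = ['Z'] := rfl
      simp [hz, show ¬((k:Int) = -1) by omega, show ¬((k:Int) = (n:Int)) by omega]
    · have hk2 : k < (goban.take n).length := by simp [Nat.min_eq_left h1]; omega
      have hg : goban.getD k [] = (goban.take n)[k] := by
        rw [List.getElem_take]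
        simp [List.getD, List.getElem?_eq_getElem (by omega : k < goban.length)]
      rw [hg]
      exact List.getElem_mem hk2
  -- assemble: replace each row of A by its closed chunk, then split the outer range
  have hchunks : ∀ x ∈ PySem.List.pyRange (-1) ((n:Int) + 1),
      (fun x => (List.map String.toList ((PySem.List.pyRange (-1) ((n:Int) + 1)).map (fun y =>
        if x = -1 ∨ x = (n:Int) ∨ y = -1 ∨ y = (n:Int) then "Z"
        else PySem.List.pyGetD (PySem.List.pyGetD goban x []) y ""))).flatten) x
      = (fun x : Int => if x = -1 ∨ x = (n:Int) then List.replicate (n + 2) 'Z'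
          else 'Z' :: ((List.map String.toList ((goban.getD x.toNat []).take n)).flatten ++ ['Z'])) x := by
    intro x hx
    rw [hR] at hx
    simp only [List.mem_cons, List.mem_append, List.mem_map, List.not_mem_nil, or_false] at hx
    have hrep : ∀ m : Nat, List.replicate (m+2) 'Z' = 'Z' :: (List.replicate m 'Z' ++ ['Z']) := by
      intro m
      rw [show m+2 = (m+1)+1 from rfl, List.replicate_succ', List.replicate_succ]
      simp
    have hz : "Z".toList = ['Z'] := rfl
    rcases hx with h | ⟨⟨k, hk, rfl⟩⟩ | rfl
    · subst h
      simp [hR, List.map_const', hrep, hz, Function.comp_def]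
    · have hkn : k < n := List.mem_range.mp hk
      have h1' := hinter k hkn
      simp only [] at h1' ⊢
      rw [h1', if_neg (by push_cast; rintro (h|h) <;> omega)]
      simp
    · simp [hR, List.map_const', hrep, hz, Function.comp_def]
  rw [List.map_congr_left hchunks, hR]
  simp only [List.map_cons, List.map_append, List.map_map, List.flatten_cons, List.flatten_append,
    List.map_nil, List.flatten_nil, List.append_nil]
  have hmid : ∀ k ∈ List.range n,
      ((fun x : Int => if x = -1 ∨ x = (n:Int) then List.replicate (n + 2) 'Z'
          else 'Z' :: ((List.map String.toList ((goban.getD x.toNat []).take n)).flatten ++ ['Z'])) ∘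
        (fun j : Nat => (Nat.cast j : Int))) k
      = ((fun row : List String => 'Z' :: ((List.map String.toList (row.take n)).flatten ++ ['Z'])) ∘
        (fun k : Nat => goban.getD k [])) k := by
    intro k hk
    have hkn : k < n := List.mem_range.mp hk
    simp only [Function.comp]
    rw [if_neg (by push_cast; rintro (h|h) <;> omega)]
    simp
  rw [List.map_congr_left hmid, ← List.map_map, map_range_getD _ _ _ h1]
  have hz : "Z".toList = ['Z'] := rfl
  simp [intercalate_nil_eq_flatten]
  congr 1
  congr 1
  apply List.map_congr_left
  intro row _
  simp [String.toList_append, hz]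

theorem two_mul_length_le_sum (l : List Nat) (h : ∀ x ∈ l, 2 ≤ x) : 2 * l.length ≤ l.sum := by
  induction l with
  | nil => simp
  | cons a t ih =>
    have ha := h a (by simp)
    have := ih (fun x hx => h x (by simp [hx]))
    simp only [List.length_cons, List.sum_cons]
    omega

theorem alt_len_lower (goban : List (List String)) (size : Int) :
    2 * (size + 2).toNat + 2 * (PySem.List.slice goban none (some size)).length
      ≤ (goban_to_string_alt goban size).toList.length := by
  simp only [goban_to_string_alt]
  rw [PySem.List.foldl_append_singleton_eq_map, PySem.Str.toList_join]
  simp only [PySem.Chars.join]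
  rw [show "".toList = ([] : List Char) from rfl, intercalate_nil_eq_flatten]
  rw [List.length_flatten]
  simp only [List.map_append, List.map_cons, List.map_nil, List.map_map, List.sum_append,
    List.sum_cons, List.sum_nil, String.toList_ofList, List.length_replicate]
  have hsum := two_mul_length_le_sum
    (((PySem.List.slice goban none (some size)).map
      (fun row => ("Z" ++ PySem.Str.join "" (PySem.List.slice row none (some size)) ++ "Z").toList.length)))
    (by intro x hx
        obtain ⟨row, _, rfl⟩ := List.mem_map.mp hx
        simp [String.toList_append])
  rw [List.length_map] at hsum
  simp only [Function.comp_def] at hsum ⊢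
  omega

theorem A_neg_one (goban : List (List String)) : goban_to_string goban (-1) = "Z" := by
  unfold goban_to_string
  rw [show (-1:Int) + 1 = 0 by omega, PySem.List.pyRange_one_cons (by omega),
    PySem.List.pyRange_one_eq_nil (by omega)]
  simp [List.foldl]
  rfl

theorem A_le_neg_two (goban : List (List String)) (size : Int) (h : size ≤ -2) :
    goban_to_string goban size = "" := by
  unfold goban_to_string
  rw [PySem.List.pyRange_one_eq_nil (by omega)]
  rfl

theorem goban_diff (goban : List (List String)) (size : Int)
    (hd : size = -1 ∨ (size ≤ -2 ∧ (-size).toNat < goban.length)) :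
    goban_to_string goban size ≠ goban_to_string_alt goban size := by
  intro heq
  rcases hd with rfl | ⟨hs, hlen⟩
  · have hB := alt_len_lower goban (-1)
    rw [← heq, A_neg_one goban] at hB
    rw [show ((-1:Int) + 2).toNat = 1 by omega, show ("Z".toList.length) = 1 from rfl] at hB
    omega
  · have hB := alt_len_lower goban size
    rw [← heq, A_le_neg_two goban size hs] at hB
    have hsl : (PySem.List.slice goban none (some size)).length = goban.length - (-size).toNat := by
      have h := PySem.List.slice_to_neg_natCast (xs := goban) (k := (-size).toNat) (by omega)
      rw [show size = -(((-size).toNat : Nat) : Int) by omega, h, List.length_take]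
      omega
    rw [hsl, show ("".toList.length) = 0 from rfl] at hB
    omega

-- both sides degenerate to "" when the board size is ≤ -2 and the goban has no rows past it
theorem goban_neg (goban : List (List String)) (size : Int) (hs : size ≤ -2)
    (hl : goban.length ≤ (-size).toNat) :
    goban_to_string goban size = goban_to_string_alt goban size := by
  unfold goban_to_string goban_to_string_alt
  rw [PySem.List.pyRange_one_eq_nil (by omega)]
  have h2 : PySem.List.slice goban none (some size) = [] := by
    have h := PySem.List.slice_to_neg_natCast (xs := goban) (k := (-size).toNat) (by omega)
    rw [show size = -(((-size).toNat : Nat) : Int) by omega, h, Nat.sub_eq_zero_of_le hl, List.take_zero]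
  rw [h2, show (size + 2).toNat = 0 by omega]
  rfl

-- ===== VERDICT (by name: the statement is the Claim_ definition above) =====
theorem goban_to_string_spec : Claim_unchanged_goban_to_string := by
  intro goban size _ hpre
  unfold Spec_goban_to_string
  intro hd
  unfold D_goban_to_string at hd
  push Not at hd
  rcases hpre with hneg | ⟨h0, h1, h2⟩
  · exact goban_neg goban size (by omega) (by omega)
  · have hcast : size = (size.toNat : Int) := (Int.toNat_of_nonneg h0).symm
    rw [hcast]
    exact goban_key goban size.toNat h1 h2

theorem goban_to_string_changed : Claim_changed_goban_to_string := by
  unfold Claim_changed_goban_to_string; decide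

theorem goban_to_string_tight : Claim_exact_goban_to_string := by
  intro goban size _ _ hd
  exact goban_diff goban size hd
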